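-- pv_equiv track=rewrite | github.com/Viciooo/ASD | doKolosa3/doKolosa3/klocki.py | klocki
-- ===== SOURCE A (Python) =====
-- def klocki(arr):
--     n = len(arr)
--     F = [0 for _ in range(n)]
--     F[0] = 1
--     for i in range(1,n):
--         a = arr[i][0]
--         b = arr[i][1]
--         for j in range(i):
--             c = arr[j][0]
--             d = arr[j][1]
--             if (c <= a and a < d) or (c > a and c < b):
--                 F[i] = max(F[i],F[j]+1)
--     return max(F)
-- ===== SOURCE B (Python) =====
-- def klocki(arr):
--     n = len(arr)
--     memo = {}
--
--     def rec(i):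
--         if i == 0:
--             return 1
--         if i in memo:
--             return memo[i]
--         a, b = arr[i]
--         best = 0
--         for j in range(i):
--             c, d = arr[j]
--             if (c <= a and a < d) or (c > a and c < b):
--                 best = max(best, rec(j) + 1)
--         memo[i] = best
--         return best
--
--     return max(rec(i) for i in range(n))
-- ===== Notes on version B (the rewrite author's own statement) =====
-- stated objective: alternative
-- what changed: Replaces the bottom-up DP table filled by two nested index loops with a top-down memoized recursion over the block index (rec(0)=1, rec(i)=max of rec(j)+1 over compatible j<i, default 0), returning the max of rec over all indices.
import Mathlib
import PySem

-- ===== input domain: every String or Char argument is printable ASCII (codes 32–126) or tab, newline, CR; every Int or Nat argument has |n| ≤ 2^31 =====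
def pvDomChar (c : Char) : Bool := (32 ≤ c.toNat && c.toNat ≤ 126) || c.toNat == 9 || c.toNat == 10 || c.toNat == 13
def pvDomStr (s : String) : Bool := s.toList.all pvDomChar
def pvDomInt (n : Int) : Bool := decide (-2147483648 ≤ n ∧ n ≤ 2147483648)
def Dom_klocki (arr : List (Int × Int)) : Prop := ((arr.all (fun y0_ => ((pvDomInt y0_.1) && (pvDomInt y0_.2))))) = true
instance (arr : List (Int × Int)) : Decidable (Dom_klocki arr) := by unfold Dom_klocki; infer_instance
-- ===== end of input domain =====

-- B replaces A's bottom-up DP table (two nested index loops) by a top-down memoized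
-- recursion over the block index; same O(n^2) cost, different decomposition.

-- ===== PORT A =====
def klocki (arr : List (Int × Int)) : Int :=
  let n := arr.length
  let F0 : List Int := (List.range n).map (fun _ => 0)
  let F1 := F0.set 0 1
  let F := (List.range' 1 (n - 1)).foldl (fun F i =>
    let a := (arr.getD i (0, 0)).1
    let b := (arr.getD i (0, 0)).2
    (List.range i).foldl (fun F j =>
      let c := (arr.getD j (0, 0)).1
      let d := (arr.getD j (0, 0)).2
      if (c ≤ a ∧ a < d) ∨ (c > a ∧ c < b) then
        F.set i (max (F.getD i 0) (F.getD j 0 + 1))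
      else F) F) F1
  (PySem.List.max? F (fun x => x)).getD 0

-- ===== PORT B =====
-- rec from Source B (the memo dict is a pure cache; values are identical without it)
def recB (arr : List (Int × Int)) (i : Nat) : Int :=
  if i = 0 then 1
  else
    let a := (arr.getD i (0, 0)).1
    let b := (arr.getD i (0, 0)).2
    (List.range i).attach.foldl (fun best j =>
      let c := (arr.getD j.1 (0, 0)).1
      let d := (arr.getD j.1 (0, 0)).2
      if (c ≤ a ∧ a < d) ∨ (c > a ∧ c < b) then max best (recB arr j.1 + 1)
      else best) 0
termination_by i
decreasing_by exact List.mem_range.mp j.2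

def klocki_alt (arr : List (Int × Int)) : Int :=
  (PySem.List.max? ((List.range arr.length).map (recB arr)) (fun x => x)).getD 0

-- ===== PRECONDITION & SPEC =====
-- Pre_ excludes only the empty list, on which A raises IndexError (F[0] = 1 on an empty F).
def Pre_klocki (arr : List (Int × Int)) : Prop := arr ≠ []
instance (arr : List (Int × Int)) : Decidable (Pre_klocki arr) := by unfold Pre_klocki; infer_instance
def pvWitness_klocki : (List (Int × Int)) := [(0, 2), (1, 3)]

def Spec_klocki (arr : List (Int × Int)) (out : Int) : Prop := out = klocki_alt arr
instance (arr : List (Int × Int)) (out : Int) : Decidable (Spec_klocki arr out) := by unfold Spec_klocki; infer_instance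

-- ===== CLAIM (what is proved, stated in full; the proofs are below) =====
def Claim_equal_klocki : Prop := ∀ (arr : List (Int × Int)), Dom_klocki arr → Pre_klocki arr → Spec_klocki arr (klocki arr)

-- ===== LEMMAS AND PROOFS =====

-- compatibility test shared by both programs (abbrev so `if` finds decidability by unfolding)
abbrev pvCompat (arr : List (Int × Int)) (i j : Nat) : Prop :=
  let a := (arr.getD i (0, 0)).1
  let b := (arr.getD i (0, 0)).2
  let c := (arr.getD j (0, 0)).1
  let d := (arr.getD j (0, 0)).2
  (c ≤ a ∧ a < d) ∨ (c > a ∧ c < b)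

-- recB, unfolded through the attach fold
theorem recB_succ (arr : List (Int × Int)) (i : Nat) (h : i ≠ 0) :
    recB arr i = (List.range i).foldl
      (fun best j => if pvCompat arr i j then max best (recB arr j + 1) else best) 0 := by
  rw [recB, if_neg h]
  show (List.range i).attach.foldl
      (fun best (j : {x // x ∈ List.range i}) =>
        if pvCompat arr i j.1 then max best (recB arr j.1 + 1) else best) 0 = _
  exact List.foldl_attach (l := List.range i)
    (f := fun best j => if pvCompat arr i j then max best (recB arr j + 1) else best) (b := 0)

theorem getD_set_ne (F : List Int) (i m : Nat) (x : Int) (h : m ≠ i) :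
    (F.set i x).getD m 0 = F.getD m 0 := by
  simp [List.getD, List.getElem?_set_ne (Ne.symm h)]

theorem getD_set_self (F : List Int) (i : Nat) (x : Int) (h : i < F.length) :
    (F.set i x).getD i 0 = x := by
  simp [List.getD, List.getElem?_set_self h]

-- the inner loop of A only writes index i and reads indices < i
theorem inner_loop_spec (arr : List (Int × Int)) (i : Nat) (L : List Nat)
    (hL : ∀ j ∈ L, j < i) :
    ∀ (F : List Int), i < F.length →
      (L.foldl (fun F j =>
        if pvCompat arr i j then F.set i (max (F.getD i 0) (F.getD j 0 + 1)) else F) F).length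
        = F.length ∧
      (∀ m, m ≠ i →
        (L.foldl (fun F j =>
          if pvCompat arr i j then F.set i (max (F.getD i 0) (F.getD j 0 + 1)) else F) F).getD m 0
          = F.getD m 0) ∧
      (L.foldl (fun F j =>
        if pvCompat arr i j then F.set i (max (F.getD i 0) (F.getD j 0 + 1)) else F) F).getD i 0
        = L.foldl (fun acc j => if pvCompat arr i j then max acc (F.getD j 0 + 1) else acc)
            (F.getD i 0) := by
  induction L with
  | nil => intro F _; exact ⟨rfl, fun _ _ => rfl, rfl⟩
  | cons j t ih =>
    intro F hF
    have hj : j < i := hL j (List.mem_cons_self ..)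
    have hjne : j ≠ i := Nat.ne_of_lt hj
    by_cases hc : pvCompat arr i j
    · simp only [List.foldl_cons, if_pos hc]
      set F' := F.set i (max (F.getD i 0) (F.getD j 0 + 1)) with hF'
      have hlen : F'.length = F.length := by simp [hF']
      have hiF' : i < F'.length := by omega
      obtain ⟨h1, h2, h3⟩ := ih (fun x hx => hL x (List.mem_cons_of_mem _ hx)) F' hiF'
      refine ⟨by rw [h1, hlen], fun m hm => by rw [h2 m hm, hF', getD_set_ne _ _ _ _ hm], ?_⟩
      rw [h3]
      have higet : F'.getD i 0 = max (F.getD i 0) (F.getD j 0 + 1) := by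
        rw [hF']; exact getD_set_self _ _ _ (by omega)
      rw [higet]
      refine PySem.List.foldl_congr_mem _ _ _ _ ?_
      intro acc x hx
      have hne : x ≠ i := Nat.ne_of_lt (hL x (List.mem_cons_of_mem _ hx))
      rw [hF', getD_set_ne _ _ _ _ hne]
    · simp only [List.foldl_cons, if_neg hc]
      exact ih (fun x hx => hL x (List.mem_cons_of_mem _ hx)) F hF

-- the outer loop of A fills F with recB's values
theorem outer_loop_spec (arr : List (Int × Int)) (n : Nat) (hn : n = arr.length)
    (hpos : 0 < n) :
    ∀ (k : Nat), k < n →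
      ((List.range' 1 k).foldl (fun F i =>
        (List.range i).foldl (fun F j =>
          if pvCompat arr i j then F.set i (max (F.getD i 0) (F.getD j 0 + 1)) else F) F)
        (((List.range n).map (fun _ => (0 : Int))).set 0 1)).length = n ∧
      (∀ m, m < n →
        ((List.range' 1 k).foldl (fun F i =>
          (List.range i).foldl (fun F j =>
            if pvCompat arr i j then F.set i (max (F.getD i 0) (F.getD j 0 + 1)) else F) F)
          (((List.range n).map (fun _ => (0 : Int))).set 0 1)).getD m 0
          = if m ≤ k then recB arr m else 0) := by
  intro k
  induction k with
  | zero =>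
    intro _
    constructor
    · simp
    · intro m hm
      rcases Nat.eq_zero_or_pos m with h0 | h0
      · subst h0
        rw [if_pos (Nat.le_refl 0), recB]
        simp only [List.range'_zero, List.foldl_nil]
        exact getD_set_self _ _ _ (by simp [hpos])
      · rw [if_neg (by omega)]
        simp only [List.range'_zero, List.foldl_nil]
        rw [getD_set_ne _ _ _ _ (by omega)]
        simp [List.getD]
  | succ k ih =>
    intro hk
    obtain ⟨hlen, hval⟩ := ih (by omega)
    rw [List.range'_concat]
    simp only [Nat.one_mul]
    rw [List.foldl_append]
    set Fk := (List.range' 1 k).foldl (fun F i =>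
      (List.range i).foldl (fun F j =>
        if pvCompat arr i j then F.set i (max (F.getD i 0) (F.getD j 0 + 1)) else F) F)
      (((List.range n).map (fun _ => (0 : Int))).set 0 1) with hFk
    simp only [List.foldl_cons, List.foldl_nil]
    have hik : 1 + k < Fk.length := by omega
    obtain ⟨h1, h2, h3⟩ := inner_loop_spec arr (1 + k) (List.range (1 + k))
      (fun j hj => List.mem_range.mp hj) Fk hik
    constructor
    · rw [h1, hlen]
    · intro m hm
      by_cases hmi : m = 1 + k
      · subst hmi
        rw [h3, if_pos (by omega)]
        rw [recB_succ arr (1 + k) (by omega)]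
        have h0 : Fk.getD (1 + k) 0 = 0 := by
          rw [hval (1 + k) hm, if_neg (by omega)]
        rw [h0]
        refine PySem.List.foldl_congr_mem _ _ _ _ ?_
        intro acc x hx
        have hxk : x < 1 + k := List.mem_range.mp hx
        have hxn : x < n := by omega
        have hxx := hval x hxn
        rw [if_pos (show x ≤ k by omega)] at hxx
        rw [hxx]
      · rw [h2 m hmi, hval m hm]
        by_cases hmk : m ≤ k
        · rw [if_pos hmk, if_pos (by omega)]
        · rw [if_neg hmk, if_neg (by omega)]

-- klocki, with its let-bound a,b,c,d folded into pvCompat (definitional)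
theorem klocki_eq (arr : List (Int × Int)) :
    klocki arr = (PySem.List.max?
      ((List.range' 1 (arr.length - 1)).foldl (fun F i =>
        (List.range i).foldl (fun F j =>
          if pvCompat arr i j then F.set i (max (F.getD i 0) (F.getD j 0 + 1)) else F) F)
        (((List.range arr.length).map (fun _ => (0 : Int))).set 0 1)) (fun x => x)).getD 0 := rfl

-- ===== VERDICT (by name: the statement is the Claim_ definition above) =====
theorem klocki_spec : Claim_equal_klocki := by
  intro arr _ hpre
  unfold Spec_klocki klocki_alt
  rw [klocki_eq]
  have hn : 0 < arr.length := List.length_pos_iff.mpr hpre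
  obtain ⟨hlen, hval⟩ := outer_loop_spec arr arr.length rfl hn (arr.length - 1) (by omega)
  have h : ((List.range' 1 (arr.length - 1)).foldl (fun F i =>
        (List.range i).foldl (fun F j =>
          if pvCompat arr i j then F.set i (max (F.getD i 0) (F.getD j 0 + 1)) else F) F)
        (((List.range arr.length).map (fun _ => (0 : Int))).set 0 1))
      = (List.range arr.length).map (recB arr) := by
    refine List.ext_getElem (by rw [hlen]; simp) ?_
    intro m hm1 hm2
    have hmn : m < arr.length := by rwa [hlen] at hm1
    have hv := hval m hmn
    rw [if_pos (by omega)] at hv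
    rw [← List.getD_eq_getElem _ 0 hm1, hv]
    simp
  rw [h]
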